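-- pv_equiv track=rewrite | github.com/cobeng13/TheScheduler | backend/app/time_utils.py | _parse_compact_days
-- ===== SOURCE A (Python) =====
-- DAY_ALIASES = {
--     "m": "M",
--     "mon": "M",
--     "monday": "M",
--     "t": "T",
--     "tu": "T",
--     "tue": "T",
--     "tues": "T",
--     "tuesday": "T",
--     "w": "W",
--     "wed": "W",
--     "weds": "W",
--     "wednesday": "W",
--     "th": "Th",
--     "thu": "Th",
--     "thur": "Th",
--     "thurs": "Th",
--     "thursday": "Th",
--     "f": "F",
--     "fri": "F",
--     "friday": "F",
--     "sa": "Sa",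
--     "sat": "Sa",
--     "saturday": "Sa",
--     "su": "Su",
--     "sun": "Su",
--     "sunday": "Su",
-- }
--
-- def _parse_compact_days(value: str) -> list[str]:
--     tokens = []
--     idx = 0
--     while idx < len(value):
--         if value[idx : idx + 2].lower() == "th":
--             tokens.append("Th")
--             idx += 2
--         elif value[idx : idx + 2].lower() == "sa":
--             tokens.append("Sa")
--             idx += 2
--         elif value[idx : idx + 2].lower() == "su":
--             tokens.append("Su")
--             idx += 2
--         else:
--             char = value[idx].lower()
--             tokens.append(DAY_ALIASES.get(char, value[idx]))
--             idx += 1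
--     return tokens
-- ===== SOURCE B (Python) =====
-- import re
--
-- DAY_ALIASES = {
--     "m": "M", "mon": "M", "monday": "M",
--     "t": "T", "tu": "T", "tue": "T", "tues": "T", "tuesday": "T",
--     "w": "W", "wed": "W", "weds": "W", "wednesday": "W",
--     "th": "Th", "thu": "Th", "thur": "Th", "thurs": "Th", "thursday": "Th",
--     "f": "F", "fri": "F", "friday": "F",
--     "sa": "Sa", "sat": "Sa", "saturday": "Sa",
--     "su": "Su", "sun": "Su", "sunday": "Su",
-- }
--
-- def _parse_compact_days(value: str) -> list[str]:
--     # Tokenize greedily left-to-right with a regex (first alternative wins),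
--     # then map each token in a second pass.
--     tokens = re.findall(r"th|sa|su|.", value, re.IGNORECASE | re.DOTALL)
--     return [
--         t.lower().capitalize() if len(t) == 2 else DAY_ALIASES.get(t.lower(), t)
--         for t in tokens
--     ]
-- ===== Notes on version B (the rewrite author's own statement) =====
-- stated objective: idiomatic
-- what changed: Replaced the manual index/while loop with a regex tokenization (re.findall of th|sa|su|. with IGNORECASE|DOTALL) followed by a separate mapping pass that capitalizes two-char tokens and alias-looks-up single chars.
import Mathlib
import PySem

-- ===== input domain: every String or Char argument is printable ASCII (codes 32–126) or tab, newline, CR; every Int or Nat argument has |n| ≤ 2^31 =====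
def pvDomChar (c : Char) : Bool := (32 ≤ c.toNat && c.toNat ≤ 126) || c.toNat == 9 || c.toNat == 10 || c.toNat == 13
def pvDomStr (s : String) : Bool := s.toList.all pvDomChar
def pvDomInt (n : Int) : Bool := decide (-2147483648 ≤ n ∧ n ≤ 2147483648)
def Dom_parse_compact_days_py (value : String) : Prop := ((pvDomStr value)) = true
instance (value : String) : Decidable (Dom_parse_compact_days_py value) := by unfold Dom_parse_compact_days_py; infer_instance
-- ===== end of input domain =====

-- B re-tokenizes with a regex (first matching alternative of `th|sa|su|.`) and maps the tokens
-- in a second pass; same return value as A; a timing run measured B faster (constant factor).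

-- module constant DAY_ALIASES (shared by both sources)
def dayAliases : PySem.Dict String String := PySem.Dict.ofList
  [("m", "M"), ("mon", "M"), ("monday", "M"),
   ("t", "T"), ("tu", "T"), ("tue", "T"), ("tues", "T"), ("tuesday", "T"),
   ("w", "W"), ("wed", "W"), ("weds", "W"), ("wednesday", "W"),
   ("th", "Th"), ("thu", "Th"), ("thur", "Th"), ("thurs", "Th"), ("thursday", "Th"),
   ("f", "F"), ("fri", "F"), ("friday", "F"),
   ("sa", "Sa"), ("sat", "Sa"), ("saturday", "Sa"),
   ("su", "Su"), ("sun", "Su"), ("sunday", "Su")]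

-- ===== PORT A =====
-- A's while-loop over idx, as structural recursion on the remaining characters:
-- value[idx:idx+2].lower() is the two next chars lowered (str.lower is charwise; exact on ASCII);
-- when one char remains the length-1 slice can never equal "th"/"sa"/"su", so only the last branch fires.
def goA : List Char → List String
  | [] => []
  | [c] =>
      [PySem.Dict.getD dayAliases (String.ofList [PySem.Chars.lowerChar c]) (String.ofList [c])]
  | c1 :: c2 :: rest =>
      if String.ofList [PySem.Chars.lowerChar c1, PySem.Chars.lowerChar c2] = "th" then
        "Th" :: goA rest
      else if String.ofList [PySem.Chars.lowerChar c1, PySem.Chars.lowerChar c2] = "sa" then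
        "Sa" :: goA rest
      else if String.ofList [PySem.Chars.lowerChar c1, PySem.Chars.lowerChar c2] = "su" then
        "Su" :: goA rest
      else
        PySem.Dict.getD dayAliases (String.ofList [PySem.Chars.lowerChar c1]) (String.ofList [c1])
          :: goA (c2 :: rest)

def parse_compact_days_py (value : String) : List String := goA value.toList

-- ===== PORT B =====
-- hand port of re.findall(r"th|sa|su|.", value, re.IGNORECASE | re.DOTALL): at each position the
-- first matching alternative wins (exact: the pattern has no backtracking across positions).
def tokenizeB : List Char → List (List Char)
  | [] => []
  | [c] => [[c]]
  | c1 :: c2 :: rest =>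
      if (String.ofList [PySem.Chars.lowerChar c1, PySem.Chars.lowerChar c2] = "th" ∨
          String.ofList [PySem.Chars.lowerChar c1, PySem.Chars.lowerChar c2] = "sa" ∨
          String.ofList [PySem.Chars.lowerChar c1, PySem.Chars.lowerChar c2] = "su") then
        [c1, c2] :: tokenizeB rest
      else
        [c1] :: tokenizeB (c2 :: rest)

-- t.lower().capitalize() if len(t) == 2 else DAY_ALIASES.get(t.lower(), t)
def mapTokB (t : List Char) : String :=
  if t.length = 2 then
    String.ofList (match t.map PySem.Chars.lowerChar with
               | [] => []
               | c :: cs => PySem.Chars.upperChar c :: cs)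
  else
    PySem.Dict.getD dayAliases (String.ofList (t.map PySem.Chars.lowerChar)) (String.ofList t)

def parse_compact_days_py_alt (value : String) : List String :=
  (tokenizeB value.toList).map mapTokB

-- ===== PRECONDITION & SPEC =====
def Spec_parse_compact_days_py (value : String) (out : List String) : Prop := out = parse_compact_days_py_alt value
instance (value : String) (out : List String) : Decidable (Spec_parse_compact_days_py value out) := by unfold Spec_parse_compact_days_py; infer_instance

-- ===== CLAIM (what is proved, stated in full; the proofs are below) =====
def Claim_equal_parse_compact_days_py : Prop := ∀ (value : String), Dom_parse_compact_days_py value → Spec_parse_compact_days_py value (parse_compact_days_py value)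

-- ===== LEMMAS AND PROOFS =====

theorem main_lemma : ∀ cs : List Char, (tokenizeB cs).map mapTokB = goA cs := by
  intro cs
  induction cs using tokenizeB.induct with
  | case1 => rfl
  | case2 c => simp [tokenizeB, goA, mapTokB]
  | case3 c1 c2 rest h ih =>
      rcases h with heq | heq | heq <;>
      · have hl := congrArg String.toList heq
        simp at hl
        obtain ⟨h1, h2⟩ := hl
        simp [tokenizeB, goA, mapTokB, h1, h2, ih]
        decide
  | case4 c1 c2 rest h ih =>
      rw [not_or, not_or] at h
      obtain ⟨h1, h2, h3⟩ := h
      simp [tokenizeB, goA, mapTokB, h1, h2, h3, ih]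

-- ===== VERDICT (by name: the statement is the Claim_ definition above) =====
theorem parse_compact_days_py_spec : Claim_equal_parse_compact_days_py := by
  intro value _
  show _ = _
  exact (main_lemma value.toList).symm
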